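-- pv_equiv track=rewrite | github.com/nyucel/blm2010 | vize/170401058.py | toplam
-- ===== SOURCE A (Python) =====
-- def toplam(vaka):   #matrisi oluşturan veriler döngü ile elde ediliyor liste olarak döndürülüyor.
--     n=len(vaka)
--     ytoplam = sum(vaka)
--     xtoplam,xikaretoplam,xikuptoplam,xidorttoplam,xibestoplam,xialtitoplam,xiyeditoplam,xisekiztoplam,xidokuztoplam,xiontoplam,xionbirtoplam,xionikitoplam = 0,0,0,0,0,0,0,0,0,0,0,0
--     xiyitoplam,xikareyitoplam,xikupyitoplam,xidortyitoplam,xibesyitoplam,xialtiyitoplam = 0,0,0,0,0,0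
--     for i in range(n):
--         xtoplam += i + 1
--         xikaretoplam += (i + 1) * (i + 1)
--         xikuptoplam += (i + 1) ** 3
--         xidorttoplam += (i + 1) ** 4
--         xibestoplam += (i + 1) ** 5
--         xialtitoplam += (i + 1) ** 6
--         xiyeditoplam += (i + 1) ** 7
--         xisekiztoplam += (i + 1) ** 8
--         xidokuztoplam += (i + 1) ** 9
--         xiontoplam += (i + 1) ** 10
--         xionbirtoplam += (i + 1) ** 11
--         xionikitoplam += (i + 1) ** 12
--         xiyitoplam += (i + 1) * vaka[i]
--         xikareyitoplam += (i + 1) ** 2 * vaka[i]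
--         xikupyitoplam += (i + 1) ** 3 * vaka[i]
--         xidortyitoplam += (i + 1) ** 4 * vaka[i]
--         xibesyitoplam += (i + 1) ** 5 * vaka[i]
--         xialtiyitoplam += (i + 1) ** 6 * vaka[i]
--     liste = [[ytoplam,xiyitoplam,xikareyitoplam,xikupyitoplam,xidortyitoplam,xibesyitoplam,xialtiyitoplam],[n,xtoplam,xikaretoplam,xikuptoplam,xidorttoplam,xibestoplam,xialtitoplam,xiyeditoplam,xisekiztoplam,xidokuztoplam,xiontoplam,xionbirtoplam,xionikitoplam]]
--     return liste
-- ===== SOURCE B (Python) =====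
-- def toplam(vaka):
--     # Closed-form (Faulhaber) power sums + one pass for the y-weighted sums (faster: no 12 power computations per element)
--     n = len(vaka)
--     x1 = n * (n + 1) // 2
--     x2 = n * (n + 1) * (2 * n + 1) // 6
--     x3 = x1 * x1
--     x4 = n * (n + 1) * (2 * n + 1) * (3 * n * n + 3 * n - 1) // 30
--     x5 = x1 * x1 * (4 * x1 - 1) // 3
--     x6 = n * (n + 1) * (2 * n + 1) * (3 * n**4 + 6 * n**3 - 3 * n + 1) // 42
--     x7 = x1 * x1 * (6 * x1 * x1 - 4 * x1 + 1) // 3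
--     x8 = n * (n + 1) * (2 * n + 1) * (5 * n**6 + 15 * n**5 + 5 * n**4 - 15 * n**3 - n**2 + 9 * n - 3) // 90
--     x9 = x1 * x1 * (16 * x1**3 - 20 * x1 * x1 + 12 * x1 - 3) // 5
--     x10 = n * (n + 1) * (2 * n + 1) * (3 * n**8 + 12 * n**7 + 8 * n**6 - 18 * n**5 - 10 * n**4 + 24 * n**3 + 2 * n**2 - 15 * n + 5) // 66
--     x11 = x1 * x1 * (16 * x1**4 - 32 * x1**3 + 34 * x1 * x1 - 20 * x1 + 5) // 3
--     x12 = n * (n + 1) * (2 * n + 1) * (105 * n**10 + 525 * n**9 + 525 * n**8 - 1050 * n**7 - 1190 * n**6 + 2310 * n**5 + 1420 * n**4 - 3285 * n**3 - 287 * n**2 + 2073 * n - 691) // 2730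
--     ysum = 0
--     w1 = w2 = w3 = w4 = w5 = w6 = 0
--     for i, y in enumerate(vaka, start=1):
--         ysum += y
--         p = i * y
--         w1 += p
--         p *= i
--         w2 += p
--         p *= i
--         w3 += p
--         p *= i
--         w4 += p
--         p *= i
--         w5 += p
--         p *= i
--         w6 += p
--     return [[ysum, w1, w2, w3, w4, w5, w6],
--             [n, x1, x2, x3, x4, x5, x6, x7, x8, x9, x10, x11, x12]]
-- ===== Notes on version B (the rewrite author's own statement) =====
-- stated objective: faster
-- what changed: The twelve pure power sums 1^p+...+n^p (p=1..12) are computed by exact closed-form Faulhaber polynomials in n instead of a loop, leaving a single pass over vaka that only maintains the y-sum and the six weighted sums via a running product instead of recomputing six powers per element.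
import Mathlib
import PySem

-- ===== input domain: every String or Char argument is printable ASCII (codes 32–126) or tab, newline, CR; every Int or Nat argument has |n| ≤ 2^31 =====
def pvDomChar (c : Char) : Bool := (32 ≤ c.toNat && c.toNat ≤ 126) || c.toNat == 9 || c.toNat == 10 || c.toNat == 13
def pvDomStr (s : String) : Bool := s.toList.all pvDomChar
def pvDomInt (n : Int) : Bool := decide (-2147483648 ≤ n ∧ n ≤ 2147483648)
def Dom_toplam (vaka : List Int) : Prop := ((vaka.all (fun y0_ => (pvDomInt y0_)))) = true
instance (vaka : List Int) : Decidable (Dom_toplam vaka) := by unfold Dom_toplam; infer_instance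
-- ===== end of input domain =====

-- B replaces the per-element computation of the twelve pure power sums by closed-form Faulhaber
-- polynomials in n (exact integer divisions) and keeps a single pass over vaka for the y-weighted sums
-- (objective: faster by a constant factor; both are O(n)).

-- ===== PORT A =====
structure StA where
  (x1 x2 x3 x4 x5 x6 x7 x8 x9 x10 x11 x12 w1 w2 w3 w4 w5 w6 : Int)
  deriving Repr, DecidableEq

def stepA (vaka : List Int) (st : StA) (i : Int) : StA :=
  let v := PySem.List.pyGetD vaka i 0   -- vaka[i]; i always in range for i in range(len(vaka))
  { x1 := st.x1 + (i + 1), x2 := st.x2 + (i + 1) * (i + 1), x3 := st.x3 + (i + 1) ^ 3,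
    x4 := st.x4 + (i + 1) ^ 4, x5 := st.x5 + (i + 1) ^ 5, x6 := st.x6 + (i + 1) ^ 6,
    x7 := st.x7 + (i + 1) ^ 7, x8 := st.x8 + (i + 1) ^ 8, x9 := st.x9 + (i + 1) ^ 9,
    x10 := st.x10 + (i + 1) ^ 10, x11 := st.x11 + (i + 1) ^ 11, x12 := st.x12 + (i + 1) ^ 12,
    w1 := st.w1 + (i + 1) * v, w2 := st.w2 + (i + 1) ^ 2 * v, w3 := st.w3 + (i + 1) ^ 3 * v,
    w4 := st.w4 + (i + 1) ^ 4 * v, w5 := st.w5 + (i + 1) ^ 5 * v, w6 := st.w6 + (i + 1) ^ 6 * v }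

def toplam (vaka : List Int) : List (List Int) :=
  let n : Int := vaka.length
  let ytoplam : Int := vaka.sum
  let st := (PySem.List.pyRange 0 n 1).foldl (stepA vaka) ⟨0,0,0,0,0,0,0,0,0,0,0,0,0,0,0,0,0,0⟩
  [[ytoplam, st.w1, st.w2, st.w3, st.w4, st.w5, st.w6],
   [n, st.x1, st.x2, st.x3, st.x4, st.x5, st.x6, st.x7, st.x8, st.x9, st.x10, st.x11, st.x12]]

-- ===== PORT B =====
structure StB where
  (ysum w1 w2 w3 w4 w5 w6 : Int)
  deriving Repr, DecidableEq

def stepB (st : StB) (iy : Int × Int) : StB :=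
  let i := iy.1
  let y := iy.2
  let p1 := i * y
  let p2 := p1 * i
  let p3 := p2 * i
  let p4 := p3 * i
  let p5 := p4 * i
  let p6 := p5 * i
  ⟨st.ysum + y, st.w1 + p1, st.w2 + p2, st.w3 + p3, st.w4 + p4, st.w5 + p5, st.w6 + p6⟩

def toplam_alt (vaka : List Int) : List (List Int) :=
  let n : Int := vaka.length
  let x1 := PySem.Int.floordiv (n * (n + 1)) 2
  let x2 := PySem.Int.floordiv (n * (n + 1) * (2 * n + 1)) 6
  let x3 := x1 * x1
  let x4 := PySem.Int.floordiv (n * (n + 1) * (2 * n + 1) * (3 * n * n + 3 * n - 1)) 30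
  let x5 := PySem.Int.floordiv (x1 * x1 * (4 * x1 - 1)) 3
  let x6 := PySem.Int.floordiv (n * (n + 1) * (2 * n + 1) * (3 * n ^ 4 + 6 * n ^ 3 - 3 * n + 1)) 42
  let x7 := PySem.Int.floordiv (x1 * x1 * (6 * x1 * x1 - 4 * x1 + 1)) 3
  let x8 := PySem.Int.floordiv (n * (n + 1) * (2 * n + 1) * (5 * n ^ 6 + 15 * n ^ 5 + 5 * n ^ 4 - 15 * n ^ 3 - n ^ 2 + 9 * n - 3)) 90
  let x9 := PySem.Int.floordiv (x1 * x1 * (16 * x1 ^ 3 - 20 * x1 * x1 + 12 * x1 - 3)) 5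
  let x10 := PySem.Int.floordiv (n * (n + 1) * (2 * n + 1) * (3 * n ^ 8 + 12 * n ^ 7 + 8 * n ^ 6 - 18 * n ^ 5 - 10 * n ^ 4 + 24 * n ^ 3 + 2 * n ^ 2 - 15 * n + 5)) 66
  let x11 := PySem.Int.floordiv (x1 * x1 * (16 * x1 ^ 4 - 32 * x1 ^ 3 + 34 * x1 * x1 - 20 * x1 + 5)) 3
  let x12 := PySem.Int.floordiv (n * (n + 1) * (2 * n + 1) * (105 * n ^ 10 + 525 * n ^ 9 + 525 * n ^ 8 - 1050 * n ^ 7 - 1190 * n ^ 6 + 2310 * n ^ 5 + 1420 * n ^ 4 - 3285 * n ^ 3 - 287 * n ^ 2 + 2073 * n - 691)) 2730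
  let st := (PySem.List.enumerate vaka 1).foldl stepB ⟨0,0,0,0,0,0,0⟩
  [[st.ysum, st.w1, st.w2, st.w3, st.w4, st.w5, st.w6],
   [n, x1, x2, x3, x4, x5, x6, x7, x8, x9, x10, x11, x12]]

-- ===== PRECONDITION & SPEC =====
def Spec_toplam (vaka : List Int) (out : List (List Int)) : Prop := out = toplam_alt vaka
instance (vaka : List Int) (out : List (List Int)) : Decidable (Spec_toplam vaka out) := by unfold Spec_toplam; infer_instance

-- ===== CLAIM (what is proved, stated in full; the proofs are below) =====
def Claim_equal_toplam : Prop := ∀ (vaka : List Int), Dom_toplam vaka → Spec_toplam vaka (toplam vaka)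

-- ===== LEMMAS AND PROOFS =====

-- S p n = 1^p + 2^p + … + n^p, the pure power sum A accumulates
def S (p n : Nat) : Int := ((List.range n).map (fun k => ((k : Int) + 1) ^ p)).sum

-- W p vaka = Σ (i+1)^p * vaka[i], the weighted power sum both loops accumulate
def W (p : Nat) (vaka : List Int) : Int :=
  ((PySem.List.enumerate vaka 1).map (fun iy => iy.1 ^ p * iy.2)).sum

lemma S_succ (p n : Nat) : S p (n + 1) = S p n + ((n : Int) + 1) ^ p := by
  simp [S, List.range_succ]

lemma W_append (p : Nat) (vaka : List Int) (y : Int) :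
    W p (vaka ++ [y]) = W p vaka + ((vaka.length : Int) + 1) ^ p * y := by
  simp [W, PySem.List.enumerate_append, PySem.List.enumerate_cons, PySem.List.enumerate_nil,
    add_comm (1 : Int)]

lemma pyGetD_append_lt (xs : List Int) (y : Int) (i : Int) (h0 : 0 ≤ i) (h : i < xs.length) :
    PySem.List.pyGetD (xs ++ [y]) i 0 = PySem.List.pyGetD xs i 0 := by
  rw [PySem.List.pyGetD_eq_getElem (xs ++ [y]) 0 h0 (by simp; omega),
      PySem.List.pyGetD_eq_getElem xs 0 h0 h]
  exact List.getElem_append_left (by omega)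

lemma foldA_char (vaka : List Int) :
    (PySem.List.pyRange 0 (vaka.length : Int) 1).foldl (stepA vaka)
        ⟨0,0,0,0,0,0,0,0,0,0,0,0,0,0,0,0,0,0⟩ =
      ⟨S 1 vaka.length, S 2 vaka.length, S 3 vaka.length, S 4 vaka.length, S 5 vaka.length,
       S 6 vaka.length, S 7 vaka.length, S 8 vaka.length, S 9 vaka.length, S 10 vaka.length,
       S 11 vaka.length, S 12 vaka.length,
       W 1 vaka, W 2 vaka, W 3 vaka, W 4 vaka, W 5 vaka, W 6 vaka⟩ := by
  induction vaka using List.reverseRecOn with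
  | nil => rfl
  | append_singleton xs y ih =>
    have hlen : (((xs ++ [y]).length : Nat) : Int) = (xs.length : Int) + 1 := by simp
    rw [hlen, PySem.List.pyRange_one_succ_right (by positivity), List.foldl_append]
    rw [PySem.List.foldl_congr_mem (PySem.List.pyRange 0 (xs.length : Int) 1)
      (stepA (xs ++ [y])) (stepA xs) _
      (by
        intro acc i hi
        obtain ⟨h0, h1⟩ := (PySem.List.mem_pyRange_one).1 hi
        simp only [stepA, pyGetD_append_lt xs y i h0 h1]), ih]
    have hv : PySem.List.pyGetD (xs ++ [y]) (xs.length : Int) 0 = y := by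
      rw [PySem.List.pyGetD_eq_getElem (xs ++ [y]) 0 (by positivity) (by simp)]
      simp
    simp only [List.foldl_cons, List.foldl_nil, stepA, hv, List.length_append,
      List.length_singleton, S_succ, W_append, StA.mk.injEq]
    and_intros <;> first | trivial | ring

lemma foldB_char (vaka : List Int) :
    (PySem.List.enumerate vaka 1).foldl stepB ⟨0,0,0,0,0,0,0⟩ =
      ⟨vaka.sum, W 1 vaka, W 2 vaka, W 3 vaka, W 4 vaka, W 5 vaka, W 6 vaka⟩ := by
  induction vaka using List.reverseRecOn with
  | nil => rfl
  | append_singleton xs y ih =>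
    rw [PySem.List.enumerate_append, List.foldl_append, ih]
    simp only [PySem.List.enumerate_cons, PySem.List.enumerate_nil, List.foldl_cons,
      List.foldl_nil, stepB, W_append, List.sum_append, List.sum_cons, List.sum_nil,
      StB.mk.injEq]
    and_intros <;> ring

-- Faulhaber identities (divisor-cleared), by induction on n
lemma F1 (n : Nat) : 2 * S 1 n = (n : Int) * (n + 1) := by
  induction n with
  | zero => simp [S]
  | succ k ih =>
    rw [S_succ]
    push_cast
    push_cast at ih
    linear_combination ih
lemma F2 (n : Nat) : 6 * S 2 n = (n : Int) * (n + 1) * (2 * n + 1) := by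
  induction n with
  | zero => simp [S]
  | succ k ih =>
    rw [S_succ]
    push_cast
    push_cast at ih
    linear_combination ih
lemma F3 (n : Nat) : 4 * S 3 n = (n : Int) ^ 2 * (n + 1) ^ 2 := by
  induction n with
  | zero => simp [S]
  | succ k ih =>
    rw [S_succ]
    push_cast
    push_cast at ih
    linear_combination ih
lemma F4 (n : Nat) : 30 * S 4 n = (n : Int) * (n + 1) * (2 * n + 1) * (3 * n ^ 2 + 3 * n - 1) := by
  induction n with
  | zero => simp [S]
  | succ k ih =>
    rw [S_succ]
    push_cast
    push_cast at ih
    linear_combination ih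
lemma F5 (n : Nat) : 12 * S 5 n = (n : Int) ^ 2 * (n + 1) ^ 2 * (2 * n ^ 2 + 2 * n - 1) := by
  induction n with
  | zero => simp [S]
  | succ k ih =>
    rw [S_succ]
    push_cast
    push_cast at ih
    linear_combination ih
lemma F6 (n : Nat) : 42 * S 6 n = (n : Int) * (n + 1) * (2 * n + 1) * (3 * n ^ 4 + 6 * n ^ 3 - 3 * n + 1) := by
  induction n with
  | zero => simp [S]
  | succ k ih =>
    rw [S_succ]
    push_cast
    push_cast at ih
    linear_combination ih
lemma F7 (n : Nat) : 24 * S 7 n = (n : Int) ^ 2 * (n + 1) ^ 2 * (3 * n ^ 4 + 6 * n ^ 3 - n ^ 2 - 4 * n + 2) := by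
  induction n with
  | zero => simp [S]
  | succ k ih =>
    rw [S_succ]
    push_cast
    push_cast at ih
    linear_combination ih
lemma F8 (n : Nat) : 90 * S 8 n = (n : Int) * (n + 1) * (2 * n + 1) * (5 * n ^ 6 + 15 * n ^ 5 + 5 * n ^ 4 - 15 * n ^ 3 - n ^ 2 + 9 * n - 3) := by
  induction n with
  | zero => simp [S]
  | succ k ih =>
    rw [S_succ]
    push_cast
    push_cast at ih
    linear_combination ih
lemma F9 (n : Nat) : 20 * S 9 n = (n : Int) ^ 2 * (n + 1) ^ 2 * (2 * n ^ 6 + 6 * n ^ 5 + n ^ 4 - 8 * n ^ 3 + n ^ 2 + 6 * n - 3) := by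
  induction n with
  | zero => simp [S]
  | succ k ih =>
    rw [S_succ]
    push_cast
    push_cast at ih
    linear_combination ih
lemma F10 (n : Nat) : 66 * S 10 n = (n : Int) * (n + 1) * (2 * n + 1) * (3 * n ^ 8 + 12 * n ^ 7 + 8 * n ^ 6 - 18 * n ^ 5 - 10 * n ^ 4 + 24 * n ^ 3 + 2 * n ^ 2 - 15 * n + 5) := by
  induction n with
  | zero => simp [S]
  | succ k ih =>
    rw [S_succ]
    push_cast
    push_cast at ih
    linear_combination ih
lemma F11 (n : Nat) : 24 * S 11 n = (n : Int) ^ 2 * (n + 1) ^ 2 * (2 * n ^ 8 + 8 * n ^ 7 + 4 * n ^ 6 - 16 * n ^ 5 - 5 * n ^ 4 + 26 * n ^ 3 - 3 * n ^ 2 - 20 * n + 10) := by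
  induction n with
  | zero => simp [S]
  | succ k ih =>
    rw [S_succ]
    push_cast
    push_cast at ih
    linear_combination ih
lemma F12 (n : Nat) : 2730 * S 12 n = (n : Int) * (n + 1) * (2 * n + 1) * (105 * n ^ 10 + 525 * n ^ 9 + 525 * n ^ 8 - 1050 * n ^ 7 - 1190 * n ^ 6 + 2310 * n ^ 5 + 1420 * n ^ 4 - 3285 * n ^ 3 - 287 * n ^ 2 + 2073 * n - 691) := by
  induction n with
  | zero => simp [S]
  | succ k ih =>
    rw [S_succ]
    push_cast
    push_cast at ih
    linear_combination ih

lemma int_cancel (c a b : Int) (hc : c ≠ 0) (h : c * a = c * b) : a = b := mul_left_cancel₀ hc h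

lemma fd_cancel (c q : Int) (hc : 0 < c) : PySem.Int.floordiv (c * q) c = q := by
  rw [PySem.Int.floordiv_eq_ediv_of_pos hc]
  exact Int.mul_ediv_cancel_left q (by omega)

-- each closed form of B equals the corresponding power sum
lemma x1_eq (n : Nat) : PySem.Int.floordiv ((n : Int) * ((n : Int) + 1)) 2 = S 1 n := by
  rw [← F1 n]; exact fd_cancel 2 _ (by norm_num)

lemma x2_eq (n : Nat) : PySem.Int.floordiv ((n : Int) * ((n : Int) + 1) * (2 * (n : Int) + 1)) 6 = S 2 n := by
  have h := F2 n
  have hE : (n : Int) * ((n : Int) + 1) * (2 * (n : Int) + 1) = 6 * S 2 n := by linear_combination -h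
  rw [hE]
  exact fd_cancel 6 _ (by norm_num)

lemma x4_eq (n : Nat) : PySem.Int.floordiv ((n : Int) * ((n : Int) + 1) * (2 * (n : Int) + 1) * (3 * (n : Int) * (n : Int) + 3 * (n : Int) - 1)) 30 = S 4 n := by
  have h := F4 n
  have hE : (n : Int) * ((n : Int) + 1) * (2 * (n : Int) + 1) * (3 * (n : Int) * (n : Int) + 3 * (n : Int) - 1) = 30 * S 4 n := by linear_combination -h
  rw [hE]
  exact fd_cancel 30 _ (by norm_num)

lemma x6_eq (n : Nat) : PySem.Int.floordiv ((n : Int) * ((n : Int) + 1) * (2 * (n : Int) + 1) * (3 * (n : Int) ^ 4 + 6 * (n : Int) ^ 3 - 3 * (n : Int) + 1)) 42 = S 6 n := by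
  have h := F6 n
  have hE : (n : Int) * ((n : Int) + 1) * (2 * (n : Int) + 1) * (3 * (n : Int) ^ 4 + 6 * (n : Int) ^ 3 - 3 * (n : Int) + 1) = 42 * S 6 n := by linear_combination -h
  rw [hE]
  exact fd_cancel 42 _ (by norm_num)

lemma x8_eq (n : Nat) : PySem.Int.floordiv ((n : Int) * ((n : Int) + 1) * (2 * (n : Int) + 1) * (5 * (n : Int) ^ 6 + 15 * (n : Int) ^ 5 + 5 * (n : Int) ^ 4 - 15 * (n : Int) ^ 3 - (n : Int) ^ 2 + 9 * (n : Int) - 3)) 90 = S 8 n := by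
  have h := F8 n
  have hE : (n : Int) * ((n : Int) + 1) * (2 * (n : Int) + 1) * (5 * (n : Int) ^ 6 + 15 * (n : Int) ^ 5 + 5 * (n : Int) ^ 4 - 15 * (n : Int) ^ 3 - (n : Int) ^ 2 + 9 * (n : Int) - 3) = 90 * S 8 n := by linear_combination -h
  rw [hE]
  exact fd_cancel 90 _ (by norm_num)

lemma x10_eq (n : Nat) : PySem.Int.floordiv ((n : Int) * ((n : Int) + 1) * (2 * (n : Int) + 1) * (3 * (n : Int) ^ 8 + 12 * (n : Int) ^ 7 + 8 * (n : Int) ^ 6 - 18 * (n : Int) ^ 5 - 10 * (n : Int) ^ 4 + 24 * (n : Int) ^ 3 + 2 * (n : Int) ^ 2 - 15 * (n : Int) + 5)) 66 = S 10 n := by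
  have h := F10 n
  have hE : (n : Int) * ((n : Int) + 1) * (2 * (n : Int) + 1) * (3 * (n : Int) ^ 8 + 12 * (n : Int) ^ 7 + 8 * (n : Int) ^ 6 - 18 * (n : Int) ^ 5 - 10 * (n : Int) ^ 4 + 24 * (n : Int) ^ 3 + 2 * (n : Int) ^ 2 - 15 * (n : Int) + 5) = 66 * S 10 n := by linear_combination -h
  rw [hE]
  exact fd_cancel 66 _ (by norm_num)

lemma x12_eq (n : Nat) : PySem.Int.floordiv ((n : Int) * ((n : Int) + 1) * (2 * (n : Int) + 1) * (105 * (n : Int) ^ 10 + 525 * (n : Int) ^ 9 + 525 * (n : Int) ^ 8 - 1050 * (n : Int) ^ 7 - 1190 * (n : Int) ^ 6 + 2310 * (n : Int) ^ 5 + 1420 * (n : Int) ^ 4 - 3285 * (n : Int) ^ 3 - 287 * (n : Int) ^ 2 + 2073 * (n : Int) - 691)) 2730 = S 12 n := by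
  have h := F12 n
  have hE : (n : Int) * ((n : Int) + 1) * (2 * (n : Int) + 1) * (105 * (n : Int) ^ 10 + 525 * (n : Int) ^ 9 + 525 * (n : Int) ^ 8 - 1050 * (n : Int) ^ 7 - 1190 * (n : Int) ^ 6 + 2310 * (n : Int) ^ 5 + 1420 * (n : Int) ^ 4 - 3285 * (n : Int) ^ 3 - 287 * (n : Int) ^ 2 + 2073 * (n : Int) - 691) = 2730 * S 12 n := by linear_combination -h
  rw [hE]
  exact fd_cancel 2730 _ (by norm_num)

lemma x3_eq (n : Nat) : S 1 n * S 1 n = S 3 n := by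
  have h1 := F1 n
  have hp := F3 n
  have key : 4 * (S 1 n * S 1 n) = 4 * (1 * S 3 n) := by
    linear_combination ((2) * (S 1 n) ^ 1 + (1) * ((n : Int)) ^ 2 + (1) * ((n : Int)) ^ 1) * h1 - 1 * hp
  have hE := int_cancel 4 _ _ (by norm_num) key
  simpa using hE
lemma x5_eq (n : Nat) :
    PySem.Int.floordiv (S 1 n * S 1 n * (4 * S 1 n - 1)) 3 = S 5 n := by
  have h1 := F1 n
  have hp := F5 n
  have key : 12 * (S 1 n * S 1 n * (4 * S 1 n - 1)) = 12 * (3 * S 5 n) := by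
    linear_combination ((24) * (S 1 n) ^ 2 + (12) * (S 1 n) ^ 1 * ((n : Int)) ^ 2 + (12) * (S 1 n) ^ 1 * ((n : Int)) ^ 1 + (-6) * (S 1 n) ^ 1 + (6) * ((n : Int)) ^ 4 + (12) * ((n : Int)) ^ 3 + (3) * ((n : Int)) ^ 2 + (-3) * ((n : Int)) ^ 1) * h1 - 3 * hp
  have hE := int_cancel 12 _ _ (by norm_num) key
  rw [hE]
  exact fd_cancel 3 _ (by norm_num)
lemma x7_eq (n : Nat) :
    PySem.Int.floordiv (S 1 n * S 1 n * (6 * (S 1 n) * (S 1 n) - 4 * S 1 n + 1)) 3 = S 7 n := by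
  have h1 := F1 n
  have hp := F7 n
  have key : 24 * (S 1 n * S 1 n * (6 * (S 1 n) * (S 1 n) - 4 * S 1 n + 1)) = 24 * (3 * S 7 n) := by
    linear_combination ((72) * (S 1 n) ^ 3 + (36) * (S 1 n) ^ 2 * ((n : Int)) ^ 2 + (36) * (S 1 n) ^ 2 * ((n : Int)) ^ 1 + (-48) * (S 1 n) ^ 2 + (18) * (S 1 n) ^ 1 * ((n : Int)) ^ 4 + (36) * (S 1 n) ^ 1 * ((n : Int)) ^ 3 + (-6) * (S 1 n) ^ 1 * ((n : Int)) ^ 2 + (-24) * (S 1 n) ^ 1 * ((n : Int)) ^ 1 + (12) * (S 1 n) ^ 1 + (9) * ((n : Int)) ^ 6 + (27) * ((n : Int)) ^ 5 + (15) * ((n : Int)) ^ 4 + (-15) * ((n : Int)) ^ 3 + (-6) * ((n : Int)) ^ 2 + (6) * ((n : Int)) ^ 1) * h1 - 3 * hp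
  have hE := int_cancel 24 _ _ (by norm_num) key
  rw [hE]
  exact fd_cancel 3 _ (by norm_num)
lemma x9_eq (n : Nat) :
    PySem.Int.floordiv (S 1 n * S 1 n * (16 * (S 1 n) ^ 3 - 20 * (S 1 n) * (S 1 n) + 12 * S 1 n - 3)) 5 = S 9 n := by
  have h1 := F1 n
  have hp := F9 n
  have key : 20 * (S 1 n * S 1 n * (16 * (S 1 n) ^ 3 - 20 * (S 1 n) * (S 1 n) + 12 * S 1 n - 3)) = 20 * (5 * S 9 n) := by
    linear_combination ((160) * (S 1 n) ^ 4 + (80) * (S 1 n) ^ 3 * ((n : Int)) ^ 2 + (80) * (S 1 n) ^ 3 * ((n : Int)) ^ 1 + (-200) * (S 1 n) ^ 3 + (40) * (S 1 n) ^ 2 * ((n : Int)) ^ 4 + (80) * (S 1 n) ^ 2 * ((n : Int)) ^ 3 + (-60) * (S 1 n) ^ 2 * ((n : Int)) ^ 2 + (-100) * (S 1 n) ^ 2 * ((n : Int)) ^ 1 + (120) * (S 1 n) ^ 2 + (20) * (S 1 n) ^ 1 * ((n : Int)) ^ 6 + (60) * (S 1 n) ^ 1 * ((n : Int)) ^ 5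 + (10) * (S 1 n) ^ 1 * ((n : Int)) ^ 4 + (-80) * (S 1 n) ^ 1 * ((n : Int)) ^ 3 + (10) * (S 1 n) ^ 1 * ((n : Int)) ^ 2 + (60) * (S 1 n) ^ 1 * ((n : Int)) ^ 1 + (-30) * (S 1 n) ^ 1 + (10) * ((n : Int)) ^ 8 + (40) * ((n : Int)) ^ 7 + (35) * ((n : Int)) ^ 6 + (-35) * ((n : Int)) ^ 5 + (-35) * ((n : Int)) ^ 4 + (35) * ((n : Int)) ^ 3 + (15) * ((n : Int)) ^ 2 + (-15) * ((n : Int)) ^ 1) * h1 - 5 * hp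
  have hE := int_cancel 20 _ _ (by norm_num) key
  rw [hE]
  exact fd_cancel 5 _ (by norm_num)
lemma x11_eq (n : Nat) :
    PySem.Int.floordiv (S 1 n * S 1 n * (16 * (S 1 n) ^ 4 - 32 * (S 1 n) ^ 3 + 34 * (S 1 n) * (S 1 n) - 20 * S 1 n + 5)) 3 = S 11 n := by
  have h1 := F1 n
  have hp := F11 n
  have key : 24 * (S 1 n * S 1 n * (16 * (S 1 n) ^ 4 - 32 * (S 1 n) ^ 3 + 34 * (S 1 n) * (S 1 n) - 20 * S 1 n + 5)) = 24 * (3 * S 11 n) := by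
    linear_combination ((192) * (S 1 n) ^ 5 + (96) * (S 1 n) ^ 4 * ((n : Int)) ^ 2 + (96) * (S 1 n) ^ 4 * ((n : Int)) ^ 1 + (-384) * (S 1 n) ^ 4 + (48) * (S 1 n) ^ 3 * ((n : Int)) ^ 4 + (96) * (S 1 n) ^ 3 * ((n : Int)) ^ 3 + (-144) * (S 1 n) ^ 3 * ((n : Int)) ^ 2 + (-192) * (S 1 n) ^ 3 * ((n : Int)) ^ 1 + (408) * (S 1 n) ^ 3 + (24) * (S 1 n) ^ 2 * ((n : Int)) ^ 6 + (72) * (S 1 n) ^ 2 * ((n : Int)) ^ 5 + (-24) * (S 1 n) ^ 2 * ((n : Int)) ^ 4 + (-168) * (S 1 n) ^ 2 * ((n : Int)) ^ 3 + (108) * (S 1 n) ^ 2 * ((n : Int)) ^ 2 + (204) * (S 1 n) ^ 2 * ((n : Int)) ^ 1 + (-240) * (S 1 n) ^ 2 + (12) * (S 1 n) ^ 1 * ((n : Int)) ^ 8 + (48) * (S 1 n) ^ 1 * ((n : Int)) ^ 7 + (24) * (S 1 n) ^ 1 * ((n : Int)) ^ 6 + (-96) * (S 1 n) ^ 1 *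 ((n : Int)) ^ 5 + (-30) * (S 1 n) ^ 1 * ((n : Int)) ^ 4 + (156) * (S 1 n) ^ 1 * ((n : Int)) ^ 3 + (-18) * (S 1 n) ^ 1 * ((n : Int)) ^ 2 + (-120) * (S 1 n) ^ 1 * ((n : Int)) ^ 1 + (60) * (S 1 n) ^ 1 + (6) * ((n : Int)) ^ 10 + (30) * ((n : Int)) ^ 9 + (36) * ((n : Int)) ^ 8 + (-36) * ((n : Int)) ^ 7 + (-63) * ((n : Int)) ^ 6 + (63) * ((n : Int)) ^ 5 + (69) * ((n : Int)) ^ 4 + (-69) * ((n : Int)) ^ 3 + (-30) * ((n : Int)) ^ 2 + (30) * ((n : Int)) ^ 1) * h1 - 3 * hp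
  have hE := int_cancel 24 _ _ (by norm_num) key
  rw [hE]
  exact fd_cancel 3 _ (by norm_num)

-- ===== VERDICT (by name: the statement is the Claim_ definition above) =====
theorem toplam_spec : Claim_equal_toplam := by
  intro vaka _
  show toplam vaka = toplam_alt vaka
  simp only [toplam, toplam_alt]
  rw [foldA_char, foldB_char]
  dsimp only
  rw [x1_eq, x2_eq, x4_eq, x5_eq, x6_eq, x7_eq, x8_eq, x9_eq, x10_eq, x11_eq, x12_eq, x3_eq]
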